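-- pv_equiv track=rewrite | github.com/deep-maheshwari/MIPS-Simulator | Phase2/mlp.py | parse
-- ===== SOURCE A (Python) =====
-- def parse(text):
--     result = text.split()
--     parsed = []
--
--     for st in result:
--
--         st = st.split(",")
--         for x in st:
--             if(x):
--                 parsed.append(x)
--
--     return parsed
-- ===== SOURCE B (Python) =====
-- def parse(text):
--     # One direct left-to-right scan: skip separator characters (whitespace or
--     # comma), and collect each maximal run of non-separator characters.
--     tokens = []
--     i, n = 0, len(text)
--     while i < n:
--         if text[i].isspace() or text[i] == ',':
--             i += 1
--         else:
--             j = i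
--             while j < n and not (text[j].isspace() or text[j] == ','):
--                 j += 1
--             tokens.append(text[i:j])
--             i = j
--     return tokens
-- ===== Notes on version B (the rewrite author's own statement) =====
-- stated objective: alternative
-- what changed: Replaces A's whitespace-split followed by a nested comma-split-and-filter loop over each word with a single left-to-right scan that collects the maximal runs of non-separator (non-whitespace, non-comma) characters directly.
import Mathlib
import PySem

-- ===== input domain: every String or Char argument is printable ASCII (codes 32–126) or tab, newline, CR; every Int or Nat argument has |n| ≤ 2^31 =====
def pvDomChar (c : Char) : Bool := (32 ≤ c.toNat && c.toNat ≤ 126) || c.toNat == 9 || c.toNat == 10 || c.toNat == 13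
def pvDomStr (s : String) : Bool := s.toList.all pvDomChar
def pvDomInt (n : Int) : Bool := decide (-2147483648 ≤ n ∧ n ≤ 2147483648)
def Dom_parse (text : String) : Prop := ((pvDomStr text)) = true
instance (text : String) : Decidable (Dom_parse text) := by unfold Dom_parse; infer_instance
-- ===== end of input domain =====

-- B replaces A's nested split loops (whitespace-split, then comma-split each word,
-- appending non-empty pieces) by one direct left-to-right scan that collects the
-- maximal runs of non-separator characters (objective: alternative decomposition).

-- ===== PORT A =====
-- A: text.split() into whitespace-words; each word split on "," in a nested loop,
-- appending the truthy (non-empty) pieces x to `parsed`.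
def parse (text : String) : List String :=
  let result := PySem.Str.split₀ text
  result.foldl
    (fun parsed st =>
      ((PySem.Chars.splitOn st.toList [',']).map String.ofList).foldl
        (fun p x => if x ≠ "" then p ++ [x] else p) parsed)
    []

-- ===== PORT B =====
-- the separator test of Source B: `text[i].isspace() or text[i] == ','`
def pvIsSep (c : Char) : Bool := PySem.Chars.isspace c || c == ','

-- Source B's scan, step for step: the outer `while` either skips one separator
-- character (`i += 1`) or lets the inner `while` advance `j` over the maximal run
-- of non-separators (`takeWhile`), appends `text[i:j]` and resumes at `j`
-- (`dropWhile`).  Exact: both loops only compare characters with the same test.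
def parseTokens (cs : List Char) : List (List Char) :=
  match cs with
  | [] => []
  | c :: rest =>
    if pvIsSep c then parseTokens rest
    else (c :: rest.takeWhile (fun d => !pvIsSep d)) :: parseTokens (rest.dropWhile (fun d => !pvIsSep d))
termination_by cs.length
decreasing_by
  · simp
  · have := List.length_dropWhile_le (fun d => !pvIsSep d) rest
    simp; omega

def parse_alt (text : String) : List String :=
  (parseTokens text.toList).map String.ofList

-- ===== PRECONDITION & SPEC =====
def Spec_parse (text : String) (out : List String) : Prop := out = parse_alt text
instance (text : String) (out : List String) : Decidable (Spec_parse text out) := by unfold Spec_parse; infer_instance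

-- ===== CLAIM (what is proved, stated in full; the proofs are below) =====
def Claim_equal_parse : Prop := ∀ (text : String), Dom_parse text → Spec_parse text (parse text)

-- ===== LEMMAS AND PROOFS =====
theorem modifyHead_nil_fun {α : Type} (l : List (List α)) :
    List.modifyHead (fun h => h) l = l := by cases l <;> simp

theorem splitOnP_head_tail (p : Char → Bool) (cs : List Char) :
    List.splitOnP p cs = cs.takeWhile (fun c => !p c) :: (List.splitOnP p cs).tail := by
  induction cs with
  | nil => simp [List.splitOnP_nil]
  | cons c rest ih =>
    by_cases h : p c = true
    · simp [List.splitOnP_cons, h]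
    · simp only [List.splitOnP_cons, h, List.takeWhile_cons]
      rw [ih]
      simp

theorem split0_go_eq (cs : List Char) : ∀ (cur : List Char) (acc : List (List Char)),
    PySem.Chars.split₀.go cs cur acc =
      acc.reverse ++ ((List.splitOnP PySem.Chars.isspace cs).modifyHead
        (fun h => cur.reverse ++ h)).filter (· ≠ []) := by
  induction cs with
  | nil =>
    intro cur acc
    rw [PySem.Chars.split₀.go.eq_1, List.splitOnP_nil]
    by_cases h : cur = [] <;> simp [h]
  | cons c rest ih =>
    intro cur acc
    rw [PySem.Chars.split₀.go.eq_2, List.splitOnP_cons]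
    by_cases hc : PySem.Chars.isspace c = true
    · rw [if_pos hc, if_pos hc]
      by_cases h : cur = []
      · rw [if_pos (by simp [h]), ih, h]
        simp [modifyHead_nil_fun]
      · rw [if_neg (by simp [h]), ih]
        simp [modifyHead_nil_fun, h]
    · rw [if_neg hc, if_neg hc, ih]
      rw [splitOnP_head_tail PySem.Chars.isspace rest]
      simp

theorem split0_eq (cs : List Char) :
    PySem.Chars.split₀ cs = (List.splitOnP PySem.Chars.isspace cs).filter (· ≠ []) := by
  rw [PySem.Chars.split₀, split0_go_eq]
  simp [modifyHead_nil_fun]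

theorem splitOn_go_eq (fuel : Nat) : ∀ (l cur : List Char) (acc : List (List Char)),
    l.length ≤ fuel →
    PySem.Chars.splitOn.go [','] fuel l cur acc =
      acc.reverse ++ (List.splitOnP (fun c => c == ',') l).modifyHead (fun h => cur.reverse ++ h) := by
  induction fuel with
  | zero =>
    intro l cur acc hl
    have hnil : l = [] := List.length_eq_zero_iff.mp (Nat.le_zero.mp hl)
    subst hnil
    rw [PySem.Chars.splitOn.go.eq_1, List.splitOnP_nil]
    simp
  | succ n ih =>
    intro l cur acc hl
    cases l with
    | nil =>
      rw [PySem.Chars.splitOn.go.eq_2 _ _ _ _ (by omega), List.splitOnP_nil]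
      simp
    | cons c rest =>
      rw [PySem.Chars.splitOn.go.eq_3, List.splitOnP_cons]
      simp only [List.length_cons] at hl
      by_cases hc : c = ','
      · subst hc
        rw [if_pos (by simp [List.isPrefixOf]), if_pos (by simp)]
        rw [ih _ _ _ (by simpa using hl)]
        simp [modifyHead_nil_fun]
      · rw [if_neg (by simp [List.isPrefixOf]; exact fun h => hc h.symm),
            if_neg (by simp; exact hc)]
        rw [ih _ _ _ (by omega)]
        rw [splitOnP_head_tail (fun c => c == ',') rest]
        simp

theorem splitOn_comma (w : List Char) :
    PySem.Chars.splitOn w [','] = List.splitOnP (fun c => c == ',') w := by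
  rw [PySem.Chars.splitOn, splitOn_go_eq _ _ _ _ (by omega)]
  simp [modifyHead_nil_fun]

theorem splitOnP_dropWhile (p : Char → Bool) (cs : List Char) :
    (List.splitOnP p (cs.dropWhile (fun c => !p c))).filter (· ≠ []) =
      ((List.splitOnP p cs).tail).filter (· ≠ []) := by
  induction cs with
  | nil => simp [List.splitOnP_nil]
  | cons c rest ih =>
    by_cases h : p c = true
    · simp [h, List.splitOnP_cons]
    · simp only [List.dropWhile_cons, h, List.splitOnP_cons]
      simpa [h, List.tail_modifyHead] using ih

theorem parseTokens_eq (cs : List Char) :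
    parseTokens cs = (List.splitOnP pvIsSep cs).filter (· ≠ []) := by
  induction cs using parseTokens.induct with
  | case1 => simp [parseTokens, List.splitOnP_nil]
  | case2 c rest hc ih =>
    rw [parseTokens, if_pos hc, List.splitOnP_cons, if_pos hc, ih]
    simp
  | case3 c rest hc ih =>
    rw [parseTokens, if_neg hc, List.splitOnP_cons, if_neg hc, ih,
        splitOnP_dropWhile, splitOnP_head_tail pvIsSep rest]
    simp

theorem takeWhile_or (p q : Char → Bool) (rest : List Char) :
    rest.takeWhile (fun c => !(p c || q c)) =
      (rest.takeWhile (fun c => !p c)).takeWhile (fun c => !q c) := by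
  rw [List.takeWhile_takeWhile]
  congr 1
  funext c
  cases hp : p c <;> cases hq : q c <;> simp

theorem splitOnP_or (p q : Char → Bool) (cs : List Char) :
    (List.splitOnP p cs).flatMap (fun w => (List.splitOnP q w).filter (· ≠ [])) =
      (List.splitOnP (fun c => p c || q c) cs).filter (· ≠ []) := by
  induction cs with
  | nil => simp [List.splitOnP_nil]
  | cons c rest ih =>
    by_cases hp : p c = true
    · rw [List.splitOnP_cons, if_pos hp, List.splitOnP_cons, if_pos (by simp [hp])]
      simpa [List.splitOnP_nil] using ih
    · rw [List.splitOnP_cons, if_neg hp, List.splitOnP_cons]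
      rw [splitOnP_head_tail p rest] at ih ⊢
      rw [splitOnP_head_tail (fun c => p c || q c) rest] at ih ⊢
      by_cases hq : q c = true
      · rw [if_pos (by simp [hp, hq])]
        simp only [List.modifyHead_cons, List.flatMap_cons, List.splitOnP_cons,
          if_pos hq, List.filter_cons] at ih ⊢
        simpa using ih
      · rw [if_neg (by simp [hp, hq])]
        simp only [List.modifyHead_cons, List.flatMap_cons, List.splitOnP_cons,
          if_neg hq] at ih ⊢
        rw [splitOnP_head_tail q (rest.takeWhile (fun c => !p c))] at ih ⊢
        rw [takeWhile_or p q rest] at ih ⊢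
        simp only [List.modifyHead_cons, List.filter_cons] at ih ⊢
        by_cases he : (rest.takeWhile (fun c => !p c)).takeWhile (fun c => !q c) = []
        · simp only [he] at ih ⊢
          simpa using ih
        · simp [he] at ih ⊢
          exact ih

theorem ofList_eq_empty_iff (w : List Char) : String.ofList w = "" ↔ w = [] := by
  constructor
  · intro h; simpa using congrArg String.toList h
  · intro h; simp [h]

theorem foldl_if_append (l : List (List Char)) (p0 : List String) :
    (l.map String.ofList).foldl (fun p x => if x ≠ "" then p ++ [x] else p) p0 =
      p0 ++ (l.filter (· ≠ [])).map String.ofList := by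
  induction l generalizing p0 with
  | nil => simp
  | cons w t ih =>
    by_cases h : w = []
    · simp [h]
      simpa using ih p0
    · simp only [List.map_cons, List.foldl_cons, List.filter_cons]
      rw [if_pos (by simpa using (ofList_eq_empty_iff w).not.mpr h), ih]
      simp [h]

theorem flatMap_filter_ne_nil (g : List Char → List String) (hg : g [] = [])
    (l : List (List Char)) : (l.filter (· ≠ [])).flatMap g = l.flatMap g := by
  induction l with
  | nil => simp
  | cons w t ih =>
    by_cases h : w = []
    · simp [h, hg]
      simpa using ih
    · simp [h]
      simpa using ih

theorem parse_eq_alt (text : String) : parse text = parse_alt text := by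
  rw [parse, parse_alt, PySem.Str.split₀, List.foldl_map]
  have step : ∀ (parsed : List String) (w : List Char),
      ((PySem.Chars.splitOn (String.ofList w).toList [',']).map String.ofList).foldl
        (fun p x => if x ≠ "" then p ++ [x] else p) parsed =
      parsed ++ ((List.splitOnP (fun c => c == ',') w).filter (· ≠ [])).map String.ofList := by
    intro parsed w
    rw [String.toList_ofList, splitOn_comma, foldl_if_append]
  simp only [step]
  rw [PySem.List.foldl_append_eq_flatMap
    (fun w => ((List.splitOnP (fun c => c == ',') w).filter (· ≠ [])).map String.ofList)]
  rw [split0_eq, flatMap_filter_ne_nil _ (by simp [List.splitOnP_nil])]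
  rw [parseTokens_eq]
  have hsep : pvIsSep = fun c => PySem.Chars.isspace c || c == ',' := rfl
  rw [hsep, ← splitOnP_or PySem.Chars.isspace (fun c => c == ',') text.toList,
      List.map_flatMap]
  simp

-- ===== VERDICT (by name: the statement is the Claim_ definition above) =====
theorem parse_spec : Claim_equal_parse := by
  intro text _
  unfold Spec_parse
  exact parse_eq_alt text
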